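-- pv_equiv track=rewrite | github.com/NVIDIA/apex | apex/contrib/sparsity/permutation_search_kernels/channel_swap.py | columns_to_stripes_and_swap_idx
-- ===== SOURCE A (Python) =====
-- def columns_to_stripes_and_swap_idx(col0, col1):
--     stripe0 = int(col0/4)
--     col0 %= 4
--     stripe1 = int(col1/4)
--     col1 %= 4
--
--     idx = 0
--     for c0 in range(4):
--         for c1 in range(4):
--             if c0 == col0 and c1 == col1:
--                 return stripe0, stripe1, idx
--             idx += 1
--     return None
-- ===== SOURCE B (Python) =====
-- def columns_to_stripes_and_swap_idx(col0, col1):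
--     # closed form: no search loop; idx of (c0, c1) in the 4x4 row-major scan is c0*4 + c1
--     return int(col0 / 4), int(col1 / 4), (col0 % 4) * 4 + (col1 % 4)
-- ===== Notes on version B (the rewrite author's own statement) =====
-- stated objective: simpler
-- what changed: Replaced the nested 4x4 search loop with the closed-form flat index (col0%4)*4 + (col1%4), computing the tuple directly in one return.
import Mathlib
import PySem

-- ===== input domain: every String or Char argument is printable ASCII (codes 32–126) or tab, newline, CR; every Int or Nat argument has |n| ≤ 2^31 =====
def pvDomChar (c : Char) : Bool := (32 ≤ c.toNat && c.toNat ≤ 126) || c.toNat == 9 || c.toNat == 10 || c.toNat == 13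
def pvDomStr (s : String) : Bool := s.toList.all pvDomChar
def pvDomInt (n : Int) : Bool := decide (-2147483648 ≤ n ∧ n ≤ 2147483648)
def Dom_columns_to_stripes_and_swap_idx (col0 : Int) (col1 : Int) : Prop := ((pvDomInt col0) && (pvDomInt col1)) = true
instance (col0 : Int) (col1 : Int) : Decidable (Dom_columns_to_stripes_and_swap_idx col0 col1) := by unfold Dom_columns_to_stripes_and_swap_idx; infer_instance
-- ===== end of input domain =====

-- B replaces A's nested 4x4 search loop with the closed-form flat index (col0%4)*4 + (col1%4) (objective: simpler).
-- ===== PORT A =====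
-- int(col0/4): on |col0| <= 2^31 the float division is exact, so int() truncates toward zero = Int.tdiv
def pvInner (c0 col0 col1 s0 s1 : Int) : List Int → Int → Option (Int × Int × Int) × Int
  | [], idx => (none, idx)
  | c1 :: rest, idx =>
    if c0 = col0 ∧ c1 = col1 then (some (s0, s1, idx), idx)
    else pvInner c0 col0 col1 s0 s1 rest (idx + 1)

def pvOuter (col0 col1 s0 s1 : Int) : List Int → Int → Option (Int × Int × Int)
  | [], _ => none
  | c0 :: rest, idx =>
    match pvInner c0 col0 col1 s0 s1 (PySem.List.pyRange 0 4 1) idx with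
    | (some r, _) => some r
    | (none, idx') => pvOuter col0 col1 s0 s1 rest idx'

def columns_to_stripes_and_swap_idx (col0 : Int) (col1 : Int) : Option (Int × Int × Int) :=
  let stripe0 := Int.tdiv col0 4
  let col0 := PySem.Int.mod col0 4
  let stripe1 := Int.tdiv col1 4
  let col1 := PySem.Int.mod col1 4
  pvOuter col0 col1 stripe0 stripe1 (PySem.List.pyRange 0 4 1) 0


-- ===== PORT B =====
def columns_to_stripes_and_swap_idx_alt (col0 : Int) (col1 : Int) : Option (Int × Int × Int) :=
  some (Int.tdiv col0 4, Int.tdiv col1 4, (PySem.Int.mod col0 4) * 4 + PySem.Int.mod col1 4)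


-- ===== PRECONDITION & SPEC =====
def Spec_columns_to_stripes_and_swap_idx (col0 : Int) (col1 : Int) (out : Option (Int × Int × Int)) : Prop := out = columns_to_stripes_and_swap_idx_alt col0 col1
instance (col0 : Int) (col1 : Int) (out : Option (Int × Int × Int)) : Decidable (Spec_columns_to_stripes_and_swap_idx col0 col1 out) := by unfold Spec_columns_to_stripes_and_swap_idx; infer_instance

-- ===== CLAIM (what is proved, stated in full; the proofs are below) =====
def Claim_equal_columns_to_stripes_and_swap_idx : Prop := ∀ (col0 : Int) (col1 : Int), Dom_columns_to_stripes_and_swap_idx col0 col1 → Spec_columns_to_stripes_and_swap_idx col0 col1 (columns_to_stripes_and_swap_idx col0 col1)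

-- ===== LEMMAS AND PROOFS =====

-- ===== VERDICT (by name: the statement is the Claim_ definition above) =====
lemma pvOuter_eval (col0 col1 s0 s1 : Int) (h0 : 0 ≤ col0 ∧ col0 < 4) (h1 : 0 ≤ col1 ∧ col1 < 4) :
    pvOuter col0 col1 s0 s1 (PySem.List.pyRange 0 4 1) 0 = some (s0, s1, col0 * 4 + col1) := by
  have e0 : col0 = 0 ∨ col0 = 1 ∨ col0 = 2 ∨ col0 = 3 := by omega
  have e1 : col1 = 0 ∨ col1 = 1 ∨ col1 = 2 ∨ col1 = 3 := by omega
  have hr : PySem.List.pyRange 0 4 1 = [0, 1, 2, 3] := by decide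
  rcases e0 with rfl | rfl | rfl | rfl <;> rcases e1 with rfl | rfl | rfl | rfl <;>
    simp [pvOuter, pvInner, hr]

theorem columns_to_stripes_and_swap_idx_spec : Claim_equal_columns_to_stripes_and_swap_idx := by
  intro col0 col1 _
  unfold Spec_columns_to_stripes_and_swap_idx columns_to_stripes_and_swap_idx columns_to_stripes_and_swap_idx_alt
  exact pvOuter_eval _ _ _ _
    ⟨PySem.Int.mod_nonneg col0 (by norm_num), PySem.Int.mod_lt col0 (by norm_num)⟩
    ⟨PySem.Int.mod_nonneg col1 (by norm_num), PySem.Int.mod_lt col1 (by norm_num)⟩
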